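-- pv_equiv track=rewrite | github.com/BJW333/Shake_n_Break_Sort | Shake_n_Break_Sort.py | breaks_for_chunk
-- ===== SOURCE A (Python) =====
-- def breaks_for_chunk(left_val, chunk, right_val):
--     """
--     Count breakpoints for a candidate window without writing into the main array.
--
--     This matches count_breaks_in_range(a, start-1, end-1) where `chunk` == a[start:end],
--     with optional boundaries:
--       - left boundary compares a[start-1] vs chunk[0]
--       - right boundary compares chunk[-1] vs a[end]
--     """
--     m = len(chunk)
--     if m < 2:
--         #Only possible breaks are boundaries
--         b = 0
--         if m == 1:
--             if left_val is not None and left_val > chunk[0]: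
--                 b += 1
--             if right_val is not None and chunk[0] > right_val:
--                 b += 1
--         return b
--
--     b = 0
--     #internal breaks
--     prev = chunk[0]
--     for j in range(1, m):
--         cur = chunk[j]
--         if prev > cur:
--             b += 1
--         prev = cur
--
--     #boundaries
--     if left_val is not None and left_val > chunk[0]:
--         b += 1
--     if right_val is not None and chunk[-1] > right_val:
--         b += 1
--     return b
-- ===== SOURCE B (Python) =====
-- def breaks_for_chunk(left_val, chunk, right_val):
--     """Divide and conquer: split the chunk in half, hand the split element to the
--     left half as its right boundary, and add the two independent counts."""
--     n = len(chunk)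
--     if n == 0:
--         return 0
--     if n == 1:
--         return int(left_val is not None and left_val > chunk[0]) + \
--                int(right_val is not None and chunk[0] > right_val)
--     mid = n // 2
--     return breaks_for_chunk(left_val, chunk[:mid], chunk[mid]) + \
--            breaks_for_chunk(None, chunk[mid:], right_val)
-- ===== Notes on version B (the rewrite author's own statement) =====
-- stated objective: alternative
-- what changed: B replaces A's single linear prev/cur scan plus separate boundary checks by a divide-and-conquer recursion: the chunk is split in half, the split element becomes the left half's right boundary, and the two independently computed counts are added (base cases: empty chunk 0, singleton chunk boundary comparisons only).
import Mathlib
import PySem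

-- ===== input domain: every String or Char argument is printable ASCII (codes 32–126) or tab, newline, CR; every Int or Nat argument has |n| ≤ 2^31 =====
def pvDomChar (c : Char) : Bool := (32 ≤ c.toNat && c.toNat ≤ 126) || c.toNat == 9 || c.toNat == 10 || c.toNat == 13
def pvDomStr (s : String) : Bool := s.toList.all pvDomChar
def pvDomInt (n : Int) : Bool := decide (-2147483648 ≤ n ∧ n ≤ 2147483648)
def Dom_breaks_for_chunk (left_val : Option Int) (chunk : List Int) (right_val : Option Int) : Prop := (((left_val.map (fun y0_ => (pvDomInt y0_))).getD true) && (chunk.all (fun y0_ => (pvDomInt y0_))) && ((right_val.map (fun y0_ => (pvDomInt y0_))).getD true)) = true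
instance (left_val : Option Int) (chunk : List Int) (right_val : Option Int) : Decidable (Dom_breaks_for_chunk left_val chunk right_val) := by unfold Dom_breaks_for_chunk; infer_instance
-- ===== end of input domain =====

-- B replaces A's linear prev/cur scan with boundary patch-ups by a divide-and-conquer
-- recursion (split in half, split element = left half's right boundary) (objective: alternative).

-- ===== PORT A =====
def breaks_for_chunk (left_val : Option Int) (chunk : List Int) (right_val : Option Int) : Int :=
  let m : Int := chunk.length
  if m < 2 then
    if m = 1 then
      let b : Int := 0
      let b := match left_val with
        | some lv => if lv > PySem.List.pyGetD chunk 0 0 then b + 1 else b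
        | none => b
      let b := match right_val with
        | some rv => if PySem.List.pyGetD chunk 0 0 > rv then b + 1 else b
        | none => b
      b
    else (0 : Int)
  else
    -- internal breaks: prev/cur loop over range(1, m)
    let st := (PySem.List.pyRange 1 m 1).foldl
      (fun (st : Int × Int) j =>
        let cur := PySem.List.pyGetD chunk j 0
        ((if st.2 > cur then st.1 + 1 else st.1), cur))
      ((0 : Int), PySem.List.pyGetD chunk 0 0)
    let b := st.1
    let b := match left_val with
      | some lv => if lv > PySem.List.pyGetD chunk 0 0 then b + 1 else b
      | none => b
    match right_val with
      | some rv => if PySem.List.pyGetD chunk (-1) 0 > rv then b + 1 else b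
      | none => b

-- ===== PORT B =====
-- divide and conquer: split the chunk in half, hand the split element to the left
-- half as its right boundary, add the two counts.  mid : Nat equals Python's n // 2
-- exactly since n = len(chunk) ≥ 0; chunk[:mid]/chunk[mid:] are List.take/List.drop.
def breaks_for_chunk_alt (left_val : Option Int) (chunk : List Int) (right_val : Option Int) : Int :=
  if _h0 : (chunk.length : Int) = 0 then 0
  else if _h1 : (chunk.length : Int) = 1 then
    (match left_val with
      | some lv => if lv > PySem.List.pyGetD chunk 0 0 then (1 : Int) else 0
      | none => 0)
    + (match right_val with
        | some rv => if PySem.List.pyGetD chunk 0 0 > rv then (1 : Int) else 0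
        | none => 0)
  else
    let mid : Nat := chunk.length / 2
    breaks_for_chunk_alt left_val (chunk.take mid) (some (PySem.List.pyGetD chunk (mid : Int) 0))
    + breaks_for_chunk_alt none (chunk.drop mid) right_val
termination_by chunk.length
decreasing_by
  · simp only [List.length_take]; omega
  · simp only [List.length_drop]; omega

-- ===== PRECONDITION & SPEC =====
def Spec_breaks_for_chunk (left_val : Option Int) (chunk : List Int) (right_val : Option Int) (out : Int) : Prop := out = breaks_for_chunk_alt left_val chunk right_val
instance (left_val : Option Int) (chunk : List Int) (right_val : Option Int) (out : Int) : Decidable (Spec_breaks_for_chunk left_val chunk right_val out) := by unfold Spec_breaks_for_chunk; infer_instance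

-- ===== CLAIM (what is proved, stated in full; the proofs are below) =====
def Claim_equal_breaks_for_chunk : Prop := ∀ (left_val : Option Int) (chunk : List Int) (right_val : Option Int), Dom_breaks_for_chunk left_val chunk right_val → Spec_breaks_for_chunk left_val chunk right_val (breaks_for_chunk left_val chunk right_val)

-- ===== LEMMAS AND PROOFS =====

-- optional boundary as a (possibly empty) list
def pvOpt : Option Int → List Int
  | some v => [v]
  | none => []

-- number of adjacent strict descents: both programs compute this on the padded sequence
def pvDescents (seq : List Int) : Int :=
  ((seq.zip (seq.drop 1)).map (fun p => if p.1 > p.2 then (1 : Int) else 0)).sum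

theorem pvDescents_cons_cons (x y : Int) (t : List Int) :
    pvDescents (x :: y :: t) = (if x > y then 1 else 0) + pvDescents (y :: t) := by
  simp [pvDescents]

-- appending one value on the right adds the last-element comparison
theorem pvDescents_append_right (xs : List Int) (x rv : Int) :
    pvDescents (x :: (xs ++ [rv])) = pvDescents (x :: xs) + (if xs.getLastD x > rv then 1 else 0) := by
  induction xs generalizing x with
  | nil => simp [pvDescents]
  | cons y ys ih =>
      rw [show y :: ys ++ [rv] = y :: (ys ++ [rv]) from rfl,
        pvDescents_cons_cons x y (ys ++ [rv]), ih y,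
        pvDescents_cons_cons x y ys, List.getLastD_cons]
      ring

-- splitting at an element: the descent count is the sum over the two overlapping halves
theorem pvDescents_split (xs : List Int) (y : Int) (ys : List Int) :
    pvDescents (xs ++ y :: ys) = pvDescents (xs ++ [y]) + pvDescents (y :: ys) := by
  induction xs with
  | nil => simp [pvDescents]
  | cons x xs ih =>
      cases xs with
      | nil =>
          rw [List.singleton_append, List.singleton_append, pvDescents_cons_cons]
          simp [pvDescents]
      | cons x2 xs' =>
          simp only [List.cons_append] at ih ⊢
          rw [pvDescents_cons_cons x x2 (xs' ++ y :: ys),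
            pvDescents_cons_cons x x2 (xs' ++ [y]), ih]
          ring

-- A's prev/cur fold computes the internal-descent count
theorem pvFold_eq_descents (xs : List Int) (x b : Int) :
    (xs.foldl (fun (st : Int × Int) cur =>
        ((if st.2 > cur then st.1 + 1 else st.1), cur)) (b, x)).1
      = b + pvDescents (x :: xs) := by
  induction xs generalizing x b with
  | nil => simp [pvDescents]
  | cons y ys ih =>
      rw [List.foldl_cons]
      simp only []
      rw [ih, pvDescents_cons_cons]
      split_ifs <;> ring

-- index of the last element of x :: xs
theorem pvGetElem_last (x : Int) (xs : List Int) :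
    (x :: xs)[xs.length]'(by simp) = xs.getLastD x := by
  induction xs generalizing x with
  | nil => rfl
  | cons y ys ih =>
      rw [List.getLastD_cons]
      have h2 : (x :: y :: ys)[(y :: ys).length]'(by simp) = (y :: ys)[ys.length]'(by simp) :=
        List.getElem_cons_succ ..
      exact h2.trans (ih y)

-- chunk[-1] on a nonempty list is its last element
theorem pvGetD_neg_one (x : Int) (xs : List Int) :
    PySem.List.pyGetD (x :: xs) (-1) 0 = xs.getLastD x := by
  simpa [PySem.List.pyGetD, PySem.List.pyGet?, PySem.List.pyIdx?] using pvGetElem_last x xs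

-- A equals the descent count of the sentinel-padded sequence
theorem pvA_eq_desc (l : Option Int) (chunk : List Int) (r : Option Int) (h : chunk ≠ []) :
    breaks_for_chunk l chunk r = pvDescents (pvOpt l ++ chunk ++ pvOpt r) := by
  unfold breaks_for_chunk
  match chunk with
  | [] => exact absurd rfl h
  | [x] =>
      cases l <;> cases r <;>
        simp [pvDescents, pvOpt, PySem.List.pyGetD, PySem.List.pyGet?, PySem.List.pyIdx?] <;>
        (try split_ifs) <;> omega
  | x :: y :: ys =>
      have hm : ¬ ((((x :: y :: ys).length : Int)) < 2) := by simp
      simp only [hm, if_false]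
      have hfold := PySem.List.foldl_pyRange_pyGetD' (x :: y :: ys) (0 : Int)
        (fun (st : Int × Int) cur => ((if st.2 > cur then st.1 + 1 else st.1), cur))
        ((0 : Int), PySem.List.pyGetD (x :: y :: ys) 0 0) (a := 1) (by norm_num)
      have h0 : PySem.List.pyGetD (x :: y :: ys) 0 0 = x := by
        simp [PySem.List.pyGetD, PySem.List.pyGet?, PySem.List.pyIdx?,
          show (0:Int) ≤ (ys.length:Int)+1 from by positivity]
      rw [h0] at hfold
      have hdrop : List.drop (1 : Int).toNat (x :: y :: ys) = y :: ys := by simp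
      rw [hdrop] at hfold
      simp only [hfold, h0, pvGetD_neg_one, pvFold_eq_descents, zero_add]
      cases l with
      | none =>
          cases r with
          | none => simp [pvOpt]
          | some rv =>
              simp only [pvOpt, List.nil_append]
              rw [show (x :: y :: ys) ++ [rv] = x :: ((y :: ys) ++ [rv]) from rfl,
                pvDescents_append_right (y :: ys) x rv, List.getLastD_cons]
              split_ifs <;> ring
      | some lv =>
          cases r with
          | none =>
              simp only [pvOpt, List.append_nil, List.singleton_append]
              rw [pvDescents_cons_cons lv x (y :: ys)]
              split_ifs <;> ring
          | some rv =>
              simp only [pvOpt, List.singleton_append]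
              rw [show (lv :: x :: y :: ys) ++ [rv] = lv :: x :: ((y :: ys) ++ [rv]) from rfl,
                pvDescents_cons_cons lv x ((y :: ys) ++ [rv]),
                pvDescents_append_right (y :: ys) x rv, List.getLastD_cons]
              split_ifs <;> ring

-- B equals the same descent count, by strong induction on the length
theorem pvB_eq_desc : ∀ (n : Nat) (chunk : List Int), chunk.length = n → chunk ≠ [] →
    ∀ (l : Option Int) (r : Option Int),
    breaks_for_chunk_alt l chunk r = pvDescents (pvOpt l ++ chunk ++ pvOpt r) := by
  intro n
  induction n using Nat.strong_induction_on with
  | _ n ih =>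
    intro chunk hn hne l r
    rw [breaks_for_chunk_alt.eq_def]
    by_cases h0 : (chunk.length : Int) = 0
    · exact absurd (by simpa using h0) hne
    by_cases h1 : (chunk.length : Int) = 1
    · -- singleton chunk
      match chunk with
      | [x] =>
          simp only [dite_eq_ite, List.length_cons, List.length_nil]
          cases l <;> cases r <;>
            simp [pvDescents, pvOpt, PySem.List.pyGetD, PySem.List.pyGet?, PySem.List.pyIdx?] <;>
            split_ifs <;> omega
      | [] => exact absurd rfl hne
      | x :: y :: ys => simp only [List.length_cons] at h1; omega
    · simp only [h0, h1, dif_neg]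
      have hlen : 2 ≤ chunk.length := by omega
      set mid : Nat := chunk.length / 2 with hmid
      have hm1 : 1 ≤ mid := by omega
      have hmlt : mid < chunk.length := by omega
      have hget : PySem.List.pyGetD chunk (mid : Int) 0 = chunk[mid] := by
        rw [PySem.List.pyGetD_natCast, List.getD_eq_getElem _ _ hmlt]
      have htlen : (chunk.take mid).length = mid := by simp [List.length_take]; omega
      have hdlen : (chunk.drop mid).length = chunk.length - mid := by simp
      have hL := ih mid (by omega) (chunk.take mid) htlen
        (by intro hnil; rw [hnil] at htlen; simp at htlen; omega) l (some chunk[mid])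
      have hR := ih (chunk.length - mid) (by omega) (chunk.drop mid) hdlen
        (by intro hnil; rw [hnil] at hdlen; simp at hdlen; omega) none r
      rw [hget, hL, hR]
      have hdrop : chunk.drop mid = chunk[mid] :: chunk.drop (mid + 1) :=
        List.drop_eq_getElem_cons hmlt
      have hsplit : chunk = chunk.take mid ++ chunk[mid] :: chunk.drop (mid + 1) := by
        rw [← hdrop, List.take_append_drop]
      conv_rhs => rw [hsplit]
      rw [hdrop]
      have := pvDescents_split (pvOpt l ++ chunk.take mid) chunk[mid]
        (chunk.drop (mid + 1) ++ pvOpt r)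
      simp only [pvOpt, List.append_assoc, List.cons_append, List.nil_append] at this ⊢
      rw [this]
      simp

-- ===== VERDICT (by name: the statement is the Claim_ definition above) =====
theorem breaks_for_chunk_spec : Claim_equal_breaks_for_chunk := by
  intro l chunk r _
  unfold Spec_breaks_for_chunk
  cases hc : chunk with
  | nil =>
      rw [breaks_for_chunk_alt.eq_def]
      simp [breaks_for_chunk]
  | cons x t =>
      rw [pvA_eq_desc l (x :: t) r (by simp),
        pvB_eq_desc (x :: t).length (x :: t) rfl (by simp) l r]
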